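-- pv_equiv track=rewrite | github.com/robincourant/the-exceptional-trajectories | src/processing/segmentation.py | find_consecutive_chunks
-- ===== SOURCE A (Python) =====
-- from typing import List, Tuple
--
-- def find_consecutive_chunks(arr: List[int]) -> List[Tuple[int, int, int]]:
--     chunks = []
--     start_index = 0
--     for i in range(1, len(arr)):
--         if arr[i] != arr[i - 1]:
--             end_index = i - 1
--             if end_index >= start_index:
--                 chunks.append((arr[start_index], start_index, end_index))
--             start_index = i
--
--     # Add the last chunk if the array ends with consecutive similar digits
--     if start_index < len(arr):
--         chunks.append((arr[start_index], start_index, len(arr) - 1))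
--
--     return chunks
-- ===== SOURCE B (Python) =====
-- from typing import List, Tuple
--
-- def find_consecutive_chunks(arr: List[int]) -> List[Tuple[int, int, int]]:
--     n = len(arr)
--     # Pass 1: indices where a new run starts, plus the sentinel n.
--     bounds = [i for i in range(n) if i == 0 or arr[i] != arr[i - 1]] + [n]
--     # Pass 2: each chunk spans from one boundary to just before the next.
--     return [(arr[s], s, e - 1) for s, e in zip(bounds, bounds[1:])]
-- ===== Notes on version B (the rewrite author's own statement) =====
-- stated objective: alternative
-- what changed: Replaces A's single stateful scan (start_index accumulator, deferred last-chunk special case) by two staged passes: first a comprehension collecting the run-start boundary indices plus a sentinel n, then a zip of adjacent boundaries producing each (value, start, end) chunk.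
import Mathlib
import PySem

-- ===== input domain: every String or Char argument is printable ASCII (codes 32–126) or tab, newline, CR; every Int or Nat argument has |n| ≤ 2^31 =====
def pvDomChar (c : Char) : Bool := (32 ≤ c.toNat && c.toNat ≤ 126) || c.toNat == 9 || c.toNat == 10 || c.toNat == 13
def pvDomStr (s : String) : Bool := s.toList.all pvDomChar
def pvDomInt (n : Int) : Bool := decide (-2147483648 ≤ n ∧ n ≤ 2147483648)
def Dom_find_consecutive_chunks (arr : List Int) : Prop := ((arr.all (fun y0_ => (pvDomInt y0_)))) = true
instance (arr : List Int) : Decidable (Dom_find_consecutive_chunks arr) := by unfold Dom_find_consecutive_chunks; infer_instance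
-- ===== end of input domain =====

-- B replaces A's single stateful scan by two staged passes: collect the run-start
-- boundary indices (plus sentinel n), then pair adjacent boundaries into chunks
-- (objective: alternative decomposition).

-- ===== PORT A =====
-- the 'for i in range(1, len(arr))' loop; fuel = number of remaining iterations.
-- indices i, i-1 and start_index are always in range here, so getD is exact.
def aLoop (arr : List Int) (fuel : Nat) (i : Nat) (chunks : List (Int × Int × Int))
    (start : Nat) : List (Int × Int × Int) × Nat :=
  match fuel with
  | 0 => (chunks, start)
  | Nat.succ fuel =>
    if arr.getD i 0 ≠ arr.getD (i - 1) 0 then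
      let chunks' := if start ≤ i - 1 then
          chunks ++ [(arr.getD start 0, (start : Int), ((i - 1 : Nat) : Int))]
        else chunks
      aLoop arr fuel (i + 1) chunks' i
    else
      aLoop arr fuel (i + 1) chunks start

def find_consecutive_chunks (arr : List Int) : List (Int × Int × Int) :=
  let n := arr.length
  let res := aLoop arr (n - 1) 1 [] 0
  if res.2 < n then res.1 ++ [(arr.getD res.2 0, (res.2 : Int), (n : Int) - 1)] else res.1

-- ===== PORT B =====
-- pass 1: [i for i in range(n) if i == 0 or arr[i] != arr[i-1]] + [n]
def pvBounds (arr : List Int) : List Nat :=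
  (List.range arr.length).filter (fun i => i == 0 || arr.getD i 0 != arr.getD (i - 1) 0)
    ++ [arr.length]

-- pass 2: [(arr[s], s, e-1) for s, e in zip(bounds, bounds[1:])]
def find_consecutive_chunks_alt (arr : List Int) : List (Int × Int × Int) :=
  let bounds := pvBounds arr
  (bounds.zip bounds.tail).map (fun se => (arr.getD se.1 0, (se.1 : Int), (se.2 : Int) - 1))

-- ===== PRECONDITION & SPEC =====
def Spec_find_consecutive_chunks (arr : List Int) (out : List (Int × Int × Int)) : Prop := out = find_consecutive_chunks_alt arr
instance (arr : List Int) (out : List (Int × Int × Int)) : Decidable (Spec_find_consecutive_chunks arr out) := by unfold Spec_find_consecutive_chunks; infer_instance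

-- ===== CLAIM (what is proved, stated in full; the proofs are below) =====
def Claim_equal_find_consecutive_chunks : Prop := ∀ (arr : List Int), Dom_find_consecutive_chunks arr → Spec_find_consecutive_chunks arr (find_consecutive_chunks arr)

-- ===== LEMMAS AND PROOFS =====

-- boundary indices of arr in [i, arr.length)
def boundsFrom (arr : List Int) (i : Nat) : List Nat :=
  (List.range' i (arr.length - i)).filter (fun j => arr.getD j 0 != arr.getD (j - 1) 0)

-- B's pass 2 as a function of the bounds list
def pairsOut (arr : List Int) (l : List Nat) : List (Int × Int × Int) :=
  (l.zip l.tail).map (fun se => (arr.getD se.1 0, (se.1 : Int), (se.2 : Int) - 1))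

lemma pairsOut_cons (arr : List Int) (a b : Nat) (rest : List Nat) :
    pairsOut arr (a :: b :: rest)
      = (arr.getD a 0, (a : Int), (b : Int) - 1) :: pairsOut arr (b :: rest) := rfl

lemma boundsFrom_step (arr : List Int) (i : Nat) (hi : i < arr.length) :
    boundsFrom arr i =
      if arr.getD i 0 ≠ arr.getD (i - 1) 0 then i :: boundsFrom arr (i + 1)
      else boundsFrom arr (i + 1) := by
  unfold boundsFrom
  have h : arr.length - i = (arr.length - (i + 1)) + 1 := by omega
  rw [h, List.range'_succ, List.filter_cons]
  split_ifs with h1 h2 h2 <;> simp_all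

lemma boundsFrom_end (arr : List Int) : boundsFrom arr arr.length = [] := by
  unfold boundsFrom
  simp

-- A's loop (followed by its finalization) emits exactly the adjacent-boundary pairs
lemma aLoop_bounds (arr : List Int) :
    ∀ fuel i start chunks, fuel = arr.length - i → 1 ≤ i → i ≤ arr.length → start < i →
    (let res := aLoop arr fuel i chunks start;
     if res.2 < arr.length then
       res.1 ++ [(arr.getD res.2 0, (res.2 : Int), (arr.length : Int) - 1)]
     else res.1)
    = chunks ++ pairsOut arr (start :: (boundsFrom arr i ++ [arr.length])) := by
  intro fuel
  induction fuel with
  | zero =>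
    intro i start chunks hf h1 hn hsi
    have hin : i = arr.length := by omega
    subst hin
    have hs : start < arr.length := hsi
    simp only [aLoop]
    rw [if_pos hs, boundsFrom_end]
    simp [pairsOut]
  | succ fuel ih =>
    intro i start chunks hf h1 hn hsi
    have hilt : i < arr.length := by omega
    simp only [aLoop]
    rw [boundsFrom_step arr i hilt]
    by_cases hne : arr.getD i 0 ≠ arr.getD (i - 1) 0
    · rw [if_pos hne, if_pos hne, if_pos (by omega : start ≤ i - 1)]
      have hrec := ih (i + 1) i (chunks ++ [(arr.getD start 0, (start : Int), ((i - 1 : Nat) : Int))])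
        (by omega) (by omega) (by omega) (by omega)
      rw [hrec, List.cons_append, pairsOut_cons]
      have : ((i - 1 : Nat) : Int) = (i : Int) - 1 := by omega
      simp [this]
    · rw [if_neg hne, if_neg hne]
      exact ih (i + 1) start chunks (by omega) (by omega) (by omega) (by omega)

-- B's pass-1 list equals 0 :: boundsFrom arr 1 (for nonempty arr)
lemma pvBounds_eq (arr : List Int) (h : arr ≠ []) :
    pvBounds arr = 0 :: (boundsFrom arr 1 ++ [arr.length]) := by
  have hn : 0 < arr.length := List.length_pos_of_ne_nil h
  unfold pvBounds boundsFrom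
  rw [List.range_eq_range', show arr.length = (arr.length - 1) + 1 by omega,
    List.range'_succ, List.filter_cons]
  have h0 : ((0 == 0 : Bool) || arr.getD 0 0 != arr.getD (0 - 1) 0) = true := by simp
  rw [if_pos h0]
  have hfc : (List.range' 1 (arr.length - 1)).filter
      (fun i => i == 0 || arr.getD i 0 != arr.getD (i - 1) 0)
      = (List.range' 1 (arr.length - 1)).filter
      (fun j => arr.getD j 0 != arr.getD (j - 1) 0) := by
    apply List.filter_congr
    intro j hj
    have : 1 ≤ j := (List.mem_range'_1.mp hj).1
    simp [Nat.ne_of_gt this]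
  rw [hfc]
  simp [show (arr.length - 1) + 1 - 1 = arr.length - 1 by omega]

-- ===== VERDICT (by name: the statement is the Claim_ definition above) =====
theorem find_consecutive_chunks_spec : Claim_equal_find_consecutive_chunks := by
  intro arr _
  unfold Spec_find_consecutive_chunks find_consecutive_chunks
  match harr : arr with
  | [] => simp [aLoop, find_consecutive_chunks_alt, pvBounds]
  | x :: xs =>
    have h := aLoop_bounds (x :: xs) ((x :: xs).length - 1) 1 0 [] (by omega) le_rfl
      (by simp) (by omega)
    show (let res := aLoop (x :: xs) ((x :: xs).length - 1) 1 [] 0;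
      if res.2 < (x :: xs).length then
        res.1 ++ [(List.getD (x :: xs) res.2 0, (res.2 : Int), ((x :: xs).length : Int) - 1)]
      else res.1) = _
    rw [h]
    unfold find_consecutive_chunks_alt
    rw [pvBounds_eq (x :: xs) (by simp)]
    rfl
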